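-- pv_equiv track=rewrite | github.com/Vatai1/DepersSystem | app/services/name_gazetteer.py | _is_name_group
-- ===== SOURCE A (Python) =====
-- def _is_name_group(group: list[dict]) -> bool:
--     has_name_part = any(w["cls"] in ("surname", "firstname", "patronymic") for w in group)
--     if not has_name_part:
--         return False
--
--     non_name = sum(1 for w in group if w["cls"] in ("skip", "geo", "unknown"))
--     name_parts = sum(1 for w in group if w["cls"] in ("surname", "firstname", "patronymic"))
--
--     if non_name > name_parts:
--         return False
--
--     return True
-- ===== SOURCE B (Python) =====
-- def _is_name_group(group: list[dict]) -> bool: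
--     name_parts = 0
--     non_name = 0
--     for w in group:
--         c = w["cls"]
--         if c in ("surname", "firstname", "patronymic"):
--             name_parts += 1
--         elif c in ("skip", "geo", "unknown"):
--             non_name += 1
--     return name_parts >= 1 and non_name <= name_parts
-- ===== Notes on version B (the rewrite author's own statement) =====
-- stated objective: simpler
-- what changed: One single pass accumulating both counters (name parts / non-name words) replaces A's three separate scans (any + two generator sums), and the redundant has_name_part check collapses into name_parts >= 1.
import Mathlib
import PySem

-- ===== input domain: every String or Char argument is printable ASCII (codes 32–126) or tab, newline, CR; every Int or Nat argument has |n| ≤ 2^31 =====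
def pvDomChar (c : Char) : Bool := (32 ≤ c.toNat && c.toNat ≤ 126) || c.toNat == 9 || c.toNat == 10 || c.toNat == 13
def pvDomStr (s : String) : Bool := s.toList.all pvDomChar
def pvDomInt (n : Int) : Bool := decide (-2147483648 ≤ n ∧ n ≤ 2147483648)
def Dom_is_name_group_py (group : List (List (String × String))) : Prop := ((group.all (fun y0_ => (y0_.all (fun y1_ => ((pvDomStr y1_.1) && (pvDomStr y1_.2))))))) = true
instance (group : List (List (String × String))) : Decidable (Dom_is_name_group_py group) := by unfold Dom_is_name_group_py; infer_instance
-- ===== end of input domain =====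

-- B: one single pass accumulating both counters instead of A's three scans; same return value.
-- ===== PORT A =====
-- w["cls"] (KeyError excluded by Pre_); default "" is unreachable under Pre_
def pvCls (w : List (String × String)) : String := (PySem.Dict.mk w).getD "cls" ""

def pvIsNamePart (w : List (String × String)) : Bool :=
  pvCls w == "surname" || pvCls w == "firstname" || pvCls w == "patronymic"

def pvIsNonName (w : List (String × String)) : Bool :=
  pvCls w == "skip" || pvCls w == "geo" || pvCls w == "unknown"

def is_name_group_py (group : List (List (String × String))) : Bool :=
  let has_name_part := group.any pvIsNamePart
  if !has_name_part then false
  else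
    let non_name : Int := (group.map (fun w => if pvIsNonName w then (1 : Int) else 0)).sum
    let name_parts : Int := (group.map (fun w => if pvIsNamePart w then (1 : Int) else 0)).sum
    if non_name > name_parts then false else true

-- ===== PORT B =====
def pvStepB (acc : Int × Int) (w : List (String × String)) : Int × Int :=
  if pvIsNamePart w then (acc.1 + 1, acc.2)
  else if pvIsNonName w then (acc.1, acc.2 + 1)
  else acc

def is_name_group_py_alt (group : List (List (String × String))) : Bool :=
  let acc := group.foldl pvStepB (0, 0)
  decide (1 ≤ acc.1) && decide (acc.2 ≤ acc.1)

-- ===== PRECONDITION & SPEC =====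
-- Pre_ excludes exactly the inputs where Python A raises KeyError: a word dict without key "cls".
def Pre_is_name_group_py (group : List (List (String × String))) : Prop :=
  (group.all (fun w => (PySem.Dict.mk w).contains "cls")) = true
instance (group : List (List (String × String))) : Decidable (Pre_is_name_group_py group) := by
  unfold Pre_is_name_group_py; infer_instance
def pvWitness_is_name_group_py : (List (List (String × String))) := [[("cls", "surname")], [("cls", "skip")]]

def Spec_is_name_group_py (group : List (List (String × String))) (out : Bool) : Prop := out = is_name_group_py_alt group
instance (group : List (List (String × String))) (out : Bool) : Decidable (Spec_is_name_group_py group out) := by unfold Spec_is_name_group_py; infer_instance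

-- ===== CLAIM (what is proved, stated in full; the proofs are below) =====
def Claim_equal_is_name_group_py : Prop := ∀ (group : List (List (String × String))), Dom_is_name_group_py group → Pre_is_name_group_py group → Spec_is_name_group_py group (is_name_group_py group)

-- ===== LEMMAS AND PROOFS =====
-- B's fold computes the two counts A computes by separate scans
lemma foldB_eq (group : List (List (String × String))) (a b : Int) :
    group.foldl pvStepB (a, b) =
      (a + (group.map (fun w => if pvIsNamePart w then (1 : Int) else 0)).sum,
       b + (group.map (fun w => if pvIsNonName w then (1 : Int) else 0)).sum) := by
  induction group generalizing a b with
  | nil => simp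
  | cons w t ih =>
    simp only [List.foldl_cons, List.map_cons, List.sum_cons, pvStepB]
    by_cases h1 : pvIsNamePart w
    · have h2 : pvIsNonName w = false := by
        unfold pvIsNamePart at h1; unfold pvIsNonName
        generalize pvCls w = c at h1 ⊢
        simp only [Bool.or_eq_true, beq_iff_eq] at h1
        rcases h1 with (rfl | rfl) | rfl <;> decide
      simp [h1, h2, ih, add_assoc]
    · by_cases h2 : pvIsNonName w <;>
        simp [h1, h2, ih, add_assoc]

lemma any_iff_sum_pos (group : List (List (String × String))) :
    group.any pvIsNamePart = true ↔
      1 ≤ (group.map (fun w => if pvIsNamePart w then (1 : Int) else 0)).sum := by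
  induction group with
  | nil => simp
  | cons w t ih =>
    have hnn : 0 ≤ (t.map (fun w => if pvIsNamePart w then (1 : Int) else 0)).sum := by
      apply List.sum_nonneg; intro x hx
      simp only [List.mem_map] at hx
      obtain ⟨y, _, rfl⟩ := hx
      split <;> omega
    by_cases h : pvIsNamePart w <;> simp [h, ih] <;> omega


-- ===== VERDICT (by name: the statement is the Claim_ definition above) =====
theorem is_name_group_py_spec : Claim_equal_is_name_group_py := by
  intro group _ _
  unfold Spec_is_name_group_py is_name_group_py is_name_group_py_alt
  rw [foldB_eq]
  simp only [zero_add]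
  by_cases h : group.any pvIsNamePart
  · have h1 := (any_iff_sum_pos group).1 h
    simp only [h, Bool.not_true, Bool.false_eq_true, if_false]
    by_cases h2 : (group.map (fun w => if pvIsNonName w then (1 : Int) else 0)).sum >
        (group.map (fun w => if pvIsNamePart w then (1 : Int) else 0)).sum <;>
      simp [h2] <;> omega
  · have h1 : ¬ 1 ≤ (group.map (fun w => if pvIsNamePart w then (1 : Int) else 0)).sum := by
      rw [← any_iff_sum_pos]; simpa using h
    simp [h, h1]
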